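-- pv_equiv track=rewrite | github.com/dchuong/python_projects | project2/generator.py | yield_and_skip
-- ===== SOURCE A (Python) =====
-- def yield_and_skip(iterable):
--     skip_num = 0
--     for v in iterable:
--         if skip_num > 0:
--             skip_num -=1
--             continue
--         if isinstance(v, int):
--             yield v
--             skip_num = v
--         if not isinstance(v, int):
--             yield v
-- ===== SOURCE B (Python) =====
-- def yield_and_skip(iterable):
--     it = iter(iterable)
--     while True:
--         try:
--             v = next(it)
--         except StopIteration:
--             return
--         yield v
--         if isinstance(v, int) and v > 0:
--             for _ in range(v):
--                 try:
--                     next(it)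
--                 except StopIteration:
--                     return
-- ===== Notes on version B (the rewrite author's own statement) =====
-- stated objective: alternative
-- what changed: B drives an explicit iterator and proactively discards the v following items with an inner next() loop right after yielding a positive int v, instead of A's carried skip_num countdown state threaded through a single for loop.
import Mathlib
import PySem

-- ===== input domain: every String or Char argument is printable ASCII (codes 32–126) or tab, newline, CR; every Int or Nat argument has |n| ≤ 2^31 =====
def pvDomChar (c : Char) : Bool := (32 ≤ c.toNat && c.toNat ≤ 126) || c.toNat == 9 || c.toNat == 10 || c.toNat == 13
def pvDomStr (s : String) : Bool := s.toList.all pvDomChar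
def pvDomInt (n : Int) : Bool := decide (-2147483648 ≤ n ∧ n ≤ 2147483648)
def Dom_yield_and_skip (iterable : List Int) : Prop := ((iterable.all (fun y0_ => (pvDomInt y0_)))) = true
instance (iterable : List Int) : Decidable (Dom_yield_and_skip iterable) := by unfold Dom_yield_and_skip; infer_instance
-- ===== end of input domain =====

-- B replaces A's carried skip_num countdown with explicit-iterator style: yield each item, then proactively discard the next v items after a positive int v; same O(n) cost, different decomposition.


-- ===== PORT A =====
-- A: a single pass carrying a skip_num countdown; on each element, if skip_num > 0
-- decrement and continue, else yield v and set skip_num = v (elements are ints here).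
def yieldSkipGoA : List Int → Int → List Int
  | [], _ => []
  | v :: rest, s => if s > 0 then yieldSkipGoA rest (s - 1) else v :: yieldSkipGoA rest v

def yield_and_skip (iterable : List Int) : List Int := yieldSkipGoA iterable 0

-- ===== PORT B =====
-- B: explicit-iterator style — after yielding v, if v > 0, discard the next v items
-- (stopping early if the iterator is exhausted), then continue with what remains.
def yieldSkipDiscard (n : Int) : List Int → List Int
  | [] => []            -- StopIteration mid-skip (or nothing to skip): nothing left
  | h :: t => if n > 0 then yieldSkipDiscard (n - 1) t else h :: t

theorem yieldSkipDiscard_length (n : Int) (l : List Int) :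
    (yieldSkipDiscard n l).length ≤ l.length := by
  induction l generalizing n with
  | nil => simp [yieldSkipDiscard]
  | cons h t ih =>
      simp only [yieldSkipDiscard]
      split
      · exact le_trans (ih (n - 1)) (by simp)
      · simp

def yield_and_skip_alt : List Int → List Int
  | [] => []
  | v :: rest =>
      v :: yield_and_skip_alt (if v > 0 then yieldSkipDiscard v rest else rest)
termination_by l => l.length
decreasing_by
  split
  · exact Nat.lt_succ_of_le (yieldSkipDiscard_length _ _)
  · simp

-- ===== PRECONDITION & SPEC =====

def Spec_yield_and_skip (iterable : List Int) (out : List Int) : Prop := out = yield_and_skip_alt iterable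
instance (iterable : List Int) (out : List Int) : Decidable (Spec_yield_and_skip iterable out) := by unfold Spec_yield_and_skip; infer_instance

-- ===== CLAIM (what is proved, stated in full; the proofs are below) =====
def Claim_equal_yield_and_skip : Prop := ∀ (iterable : List Int), Dom_yield_and_skip iterable → Spec_yield_and_skip iterable (yield_and_skip iterable)

-- ===== LEMMAS AND PROOFS =====

theorem yieldSkipDiscard_eq_drop (n : Int) (l : List Int) :
    yieldSkipDiscard n l = l.drop n.toNat := by
  induction l generalizing n with
  | nil => simp [yieldSkipDiscard]
  | cons h t ih =>
      simp only [yieldSkipDiscard]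
      split
      · rename_i hn
        rw [ih (n - 1)]
        have : n.toNat = (n - 1).toNat + 1 := by omega
        rw [this]; rfl
      · rename_i hn
        have : n.toNat = 0 := by omega
        rw [this]; rfl

theorem yieldSkipGoA_eq_alt (l : List Int) (s : Int) :
    yieldSkipGoA l s = yield_and_skip_alt (l.drop s.toNat) := by
  induction l generalizing s with
  | nil => simp [yieldSkipGoA, yield_and_skip_alt]
  | cons v rest ih =>
      unfold yieldSkipGoA
      split
      · rename_i hs
        rw [ih (s - 1)]
        have : s.toNat = (s - 1).toNat + 1 := by omega
        rw [this]; rfl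
      · rename_i hs
        have : s.toNat = 0 := by omega
        rw [this]
        simp only [List.drop]
        unfold yield_and_skip_alt
        rw [ih v]
        congr 1
        split
        · rw [yieldSkipDiscard_eq_drop]
        · rename_i hv
          have : v.toNat = 0 := by omega
          rw [this]; rfl

-- ===== VERDICT (by name: the statement is the Claim_ definition above) =====
theorem yield_and_skip_spec : Claim_equal_yield_and_skip := by
  intro l _
  show yield_and_skip l = yield_and_skip_alt l
  unfold yield_and_skip
  simpa using yieldSkipGoA_eq_alt l 0
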